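-- pv_equiv track=rewrite | github.com/katherinemumu/python | APR2020/150OddPair.py | yeah
-- ===== SOURCE A (Python) =====
-- def yeah(l):
--     for i in range(len(l)):
--         for j in range(len(l)):
--             if i != j:
--                 p = i * j
--                 if (p % 2 == 1):
--                     return True
--     return False
-- ===== SOURCE B (Python) =====
-- def yeah(l):
--     # Indices i != j with i*j odd exist iff there are two distinct odd indices,
--     # i.e. indices 1 and 3 exist, i.e. len(l) >= 4.
--     return len(l) >= 4
-- ===== Notes on version B (the rewrite author's own statement) =====
-- stated objective: faster
-- what changed: Replaced the O(n^2) scan over index pairs by the closed form len(l) >= 4 (an odd product i*j needs two distinct odd indices, smallest being 1 and 3).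
import Mathlib
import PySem

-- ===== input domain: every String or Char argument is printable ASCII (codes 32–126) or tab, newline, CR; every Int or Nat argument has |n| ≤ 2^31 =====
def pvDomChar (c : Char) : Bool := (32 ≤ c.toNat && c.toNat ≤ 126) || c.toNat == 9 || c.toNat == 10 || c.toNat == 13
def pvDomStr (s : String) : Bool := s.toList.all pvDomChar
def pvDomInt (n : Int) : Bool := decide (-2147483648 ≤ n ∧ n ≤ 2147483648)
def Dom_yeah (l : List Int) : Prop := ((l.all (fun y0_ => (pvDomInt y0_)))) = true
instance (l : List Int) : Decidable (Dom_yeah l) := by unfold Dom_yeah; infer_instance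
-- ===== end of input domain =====

-- B replaces A's O(n^2) scan over index pairs with the closed form len(l) >= 4
-- (an odd product i*j needs two distinct odd indices, the smallest being 1 and 3).

-- ===== PORT A =====
-- nested for-loops over range(len(l)) with early 'return True' = List.any over pyRange
def yeah (l : List Int) : Bool :=
  (PySem.List.pyRange 0 l.length 1).any (fun i =>
    (PySem.List.pyRange 0 l.length 1).any (fun j =>
      decide (i ≠ j) && (PySem.Int.mod (i * j) 2 == 1)))

-- ===== PORT B =====
def yeah_alt (l : List Int) : Bool := decide (4 ≤ l.length)

-- ===== PRECONDITION & SPEC =====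
def Spec_yeah (l : List Int) (out : Bool) : Prop := out = yeah_alt l
instance (l : List Int) (out : Bool) : Decidable (Spec_yeah l out) := by unfold Spec_yeah; infer_instance

-- ===== CLAIM (what is proved, stated in full; the proofs are below) =====
def Claim_equal_yeah : Prop := ∀ (l : List Int), Dom_yeah l → Spec_yeah l (yeah l)

-- ===== LEMMAS AND PROOFS =====

theorem yeah_eq (l : List Int) : yeah l = yeah_alt l := by
  unfold yeah yeah_alt
  apply Bool.eq_iff_iff.mpr
  simp only [List.any_eq_true, PySem.List.mem_pyRange_one, Bool.and_eq_true,
    decide_eq_true_eq, beq_iff_eq]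
  constructor
  · rintro ⟨i, ⟨hi0, hin⟩, j, ⟨hj0, hjn⟩, hne, hmod⟩
    rw [PySem.Int.mod_eq_emod_of_pos (by omega : (0:Int) < 2)] at hmod
    -- i*j odd forces i, j odd, hence i,j ∈ {1,3,...}; distinct odd i,j < n forces n ≥ 4
    have hio : i % 2 = 1 := by
      rcases Int.emod_two_eq i with h2 | h2
      · exfalso
        have hd : (2:Int) ∣ i * j := Dvd.dvd.mul_right (Int.dvd_of_emod_eq_zero h2) j
        have := Int.emod_eq_zero_of_dvd hd
        omega
      · exact h2
    have hjo : j % 2 = 1 := by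
      rcases Int.emod_two_eq j with h2 | h2
      · exfalso
        have hd : (2:Int) ∣ i * j := Dvd.dvd.mul_left (Int.dvd_of_emod_eq_zero h2) i
        have := Int.emod_eq_zero_of_dvd hd
        omega
      · exact h2
    omega
  · intro h
    refine ⟨1, ⟨by omega, by omega⟩, 3, ⟨by omega, by omega⟩, by omega, ?_⟩
    rw [PySem.Int.mod_eq_emod_of_pos (by omega : (0:Int) < 2)]; decide

-- ===== VERDICT (by name: the statement is the Claim_ definition above) =====
theorem yeah_spec : Claim_equal_yeah := by
  intro l _
  unfold Spec_yeah
  exact yeah_eq l
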